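-- pv_equiv track=rewrite | github.com/yongjaenala/Coding_Test_Practice | Junmo/Programmers/Lv. 0/팩토리얼.py | solution
-- ===== SOURCE A (Python) =====
-- def factorial(n):
--     if n <= 1:
--         return 1
--     return factorial(n - 1) * n
--
-- def solution(n):
--     answer = 0
--
--     for i in range(1, 11):
--         if n >= factorial(i):
--             answer += 1
--         else:
--             break
--
--     return answer
-- ===== SOURCE B (Python) =====
-- # Binary search over a precomputed table of 1!..10! instead of a loop recomputing factorials.
-- FACTS = [1, 2, 6, 24, 120, 720, 5040, 40320, 362880, 3628800]
--
-- def solution(n):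
--     lo, hi = 0, len(FACTS)
--     while lo < hi:
--         mid = (lo + hi) // 2
--         if FACTS[mid] <= n:
--             lo = mid + 1
--         else:
--             hi = mid
--     return lo
-- ===== Notes on version B (the rewrite author's own statement) =====
-- stated objective: idiomatic
-- what changed: Replaced the linear loop that recomputes each factorial recursively (and breaks early) by a precomputed constant table of 1!..10! with a hand-written binary search (bisect_right) counting how many entries are <= n.
import Mathlib
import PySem

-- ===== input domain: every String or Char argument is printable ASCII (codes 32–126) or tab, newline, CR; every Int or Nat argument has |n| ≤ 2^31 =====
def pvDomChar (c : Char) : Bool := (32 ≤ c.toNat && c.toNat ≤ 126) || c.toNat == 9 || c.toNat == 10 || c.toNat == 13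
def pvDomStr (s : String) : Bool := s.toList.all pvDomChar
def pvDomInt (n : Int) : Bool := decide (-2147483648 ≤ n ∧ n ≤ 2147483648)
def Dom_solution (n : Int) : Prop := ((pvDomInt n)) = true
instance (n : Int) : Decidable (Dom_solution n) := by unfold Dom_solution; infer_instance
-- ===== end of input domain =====

-- B replaces A's loop of recursively recomputed factorials by binary search on a
-- precomputed table of 1!..10!; equal counts since the table is strictly increasing.

-- ===== PORT A =====
def factorial (n : Int) : Int :=
  if n ≤ 1 then 1 else factorial (n - 1) * n
termination_by n.toNat
decreasing_by omega

-- the 'for i in range(1, 11)' loop with its break, as structural recursion on i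
def solLoopA (n : Int) (i : Nat) (answer : Int) : Int :=
  if i ≥ 11 then answer
  else if n ≥ factorial i then solLoopA n (i + 1) (answer + 1)
  else answer
termination_by 11 - i

def solution (n : Int) : Int := solLoopA n 1 0

-- ===== PORT B =====
def pvFacts : List Int := [1, 2, 6, 24, 120, 720, 5040, 40320, 362880, 3628800]

-- the 'while lo < hi' binary search of Source B
def solBsearch (n : Int) (lo hi : Nat) : Nat :=
  if lo < hi then
    let mid := (lo + hi) / 2
    if pvFacts.getD mid 0 ≤ n then solBsearch n (mid + 1) hi
    else solBsearch n lo mid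
  else lo
termination_by hi - lo
decreasing_by all_goals omega

def solution_alt (n : Int) : Int := (solBsearch n 0 pvFacts.length : Int)

-- ===== PRECONDITION & SPEC =====
def Spec_solution (n : Int) (out : Int) : Prop := out = solution_alt n
instance (n : Int) (out : Int) : Decidable (Spec_solution n out) := by unfold Spec_solution; infer_instance

-- ===== CLAIM (what is proved, stated in full; the proofs are below) =====
def Claim_equal_solution : Prop := ∀ (n : Int), Dom_solution n → Spec_solution n (solution n)

-- ===== LEMMAS AND PROOFS =====

-- ===== VERDICT (by name: the statement is the Claim_ definition above) =====
set_option maxRecDepth 8000 in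
theorem solution_spec : Claim_equal_solution := by
  intro n _
  unfold Spec_solution solution solution_alt
  simp [solLoopA, solBsearch, factorial, pvFacts]
  split_ifs <;> omega
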